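-- pv_equiv track=rewrite | github.com/francoislanc/midistral | backend/src/midistral/abc_utils.py | count_max_opened_parentheses
-- ===== SOURCE A (Python) =====
-- def count_max_opened_parentheses(s: str) -> int:
--     current_count = 0
--     max_count = 0
--     for char in s:
--         if char == "(":
--             current_count += 1
--             if current_count > max_count:
--                 max_count = current_count
--         elif char == ")":
--             current_count -= 1
--     return max_count
-- ===== SOURCE B (Python) =====
-- def count_max_opened_parentheses(s: str) -> int:
--     # Divide and conquer: for a substring return (total, best) where total is the
--     # sum of +1/-1 deltas and best = max prefix-sum (the empty prefix included,
--     # so best >= 0). Combining halves: best = max(best_left, total_left + best_right).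
--     def go(lo: int, hi: int) -> tuple:
--         if hi - lo <= 1:
--             if hi - lo == 0:
--                 return (0, 0)
--             c = s[lo]
--             d = 1 if c == "(" else (-1 if c == ")" else 0)
--             return (d, d if d > 0 else 0)
--         mid = (lo + hi) // 2
--         tl, ml = go(lo, mid)
--         tr, mr = go(mid, hi)
--         return (tl + tr, max(ml, tl + mr))
--     return go(0, len(s))[1]
-- ===== Notes on version B (the rewrite author's own statement) =====
-- stated objective: alternative
-- what changed: B replaces A's left-to-right stateful scan by a divide-and-conquer recursion: each half of the string yields a (total delta, max prefix depth) pair and the halves are combined with (tl+tr, max(ml, tl+mr)), as in a segment tree for maximum prefix sum.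
import Mathlib
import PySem

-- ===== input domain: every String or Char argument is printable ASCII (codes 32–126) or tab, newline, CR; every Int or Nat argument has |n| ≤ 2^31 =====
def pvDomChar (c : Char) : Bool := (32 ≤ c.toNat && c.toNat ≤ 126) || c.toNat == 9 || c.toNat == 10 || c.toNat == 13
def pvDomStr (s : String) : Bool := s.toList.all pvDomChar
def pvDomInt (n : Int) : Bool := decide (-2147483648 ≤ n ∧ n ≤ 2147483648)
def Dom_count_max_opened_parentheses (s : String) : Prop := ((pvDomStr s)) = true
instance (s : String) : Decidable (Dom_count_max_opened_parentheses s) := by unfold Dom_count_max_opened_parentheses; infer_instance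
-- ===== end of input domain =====

-- B replaces A's left-to-right stateful scan by a divide-and-conquer recursion on string halves,
-- combining (total delta, max prefix depth) pairs (alternative decomposition, same O(n) cost).

-- ===== PORT A =====
-- A's loop body: update current_count and max_count per char, in A's branch order.
def pvStepA (st : Int × Int) (c : Char) : Int × Int :=
  if c = '(' then
    let cur := st.1 + 1
    (cur, if cur > st.2 then cur else st.2)
  else if c = ')' then (st.1 - 1, st.2)
  else st

def count_max_opened_parentheses (s : String) : Int :=
  (s.toList.foldl pvStepA (0, 0)).2

-- ===== PORT B =====
-- Source B's go(lo, hi): (total delta, max prefix sum with the empty prefix) of s[lo:hi],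
-- by splitting at mid = (lo+hi)//2. The l[lo]? default 0 is unreachable: go is only
-- called with lo < hi ≤ len(s).
def pvGo (l : List Char) (lo hi : Nat) : Int × Int :=
  if hi - lo ≤ 1 then
    if hi - lo = 0 then (0, 0)
    else
      let d : Int :=
        match l[lo]? with
        | some c => if c = '(' then 1 else if c = ')' then -1 else 0
        | none => 0
      (d, if d > 0 then d else 0)
  else
    let mid := (lo + hi) / 2
    let (tl, ml) := pvGo l lo mid
    let (tr, mr) := pvGo l mid hi
    (tl + tr, max ml (tl + mr))
termination_by hi - lo
decreasing_by all_goals omega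

def count_max_opened_parentheses_alt (s : String) : Int :=
  (pvGo s.toList 0 s.toList.length).2

-- ===== PRECONDITION & SPEC =====
def Spec_count_max_opened_parentheses (s : String) (out : Int) : Prop := out = count_max_opened_parentheses_alt s
instance (s : String) (out : Int) : Decidable (Spec_count_max_opened_parentheses s out) := by unfold Spec_count_max_opened_parentheses; infer_instance

-- ===== CLAIM (what is proved, stated in full; the proofs are below) =====
def Claim_equal_count_max_opened_parentheses : Prop := ∀ (s : String), Dom_count_max_opened_parentheses s → Spec_count_max_opened_parentheses s (count_max_opened_parentheses s)

-- ===== LEMMAS AND PROOFS =====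

-- the character delta
def pvD (c : Char) : Int := if c = '(' then 1 else if c = ')' then -1 else 0

-- total delta of a list
def pvS (l : List Char) : Int := (l.map pvD).sum

-- maximum prefix sum (the empty prefix included, so pvM l ≥ 0)
def pvM : List Char → Int
  | [] => 0
  | c :: cs => max 0 (pvD c + pvM cs)

theorem pvM_nonneg (l : List Char) : 0 ≤ pvM l := by
  cases l <;> simp [pvM]

theorem pvS_append (a b : List Char) : pvS (a ++ b) = pvS a + pvS b := by
  simp [pvS]

theorem pvM_append (a b : List Char) : pvM (a ++ b) = max (pvM a) (pvS a + pvM b) := by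
  induction a with
  | nil => have := pvM_nonneg b; simp [pvM, pvS]; omega
  | cons c cs ih =>
    simp only [List.cons_append, pvM, ih, pvS, List.map, List.sum_cons]
    omega

-- pvGo computes (pvS, pvM) of the slice l[lo:hi]
theorem pvGo_spec (l : List Char) (lo hi : Nat) (h1 : lo ≤ hi) (h2 : hi ≤ l.length) :
    pvGo l lo hi = (pvS ((l.drop lo).take (hi - lo)), pvM ((l.drop lo).take (hi - lo))) := by
  by_cases hb : hi - lo ≤ 1
  · by_cases h0 : hi - lo = 0
    · rw [pvGo]; simp [h0, pvS, pvM]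
    · have hhi : hi = lo + 1 := by omega
      subst hhi
      have hlt : lo < l.length := by omega
      have hsl : (l.drop lo).take (lo + 1 - lo) = [l[lo]] := by
        simp only [Nat.add_sub_cancel_left]
        rw [List.take_one, List.head?_drop, l.getElem?_eq_getElem hlt]; rfl
      rw [pvGo, hsl]
      simp [l.getElem?_eq_getElem hlt, pvS, pvM, pvD, Prod.ext_iff]
      split_ifs <;> omega
  · rw [pvGo]
    simp only [if_neg hb]
    have hm1 : lo ≤ (lo + hi) / 2 := by omega
    have hm2 : (lo + hi) / 2 ≤ hi := by omega
    rw [pvGo_spec l lo ((lo + hi) / 2) hm1 (by omega),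
        pvGo_spec l ((lo + hi) / 2) hi hm2 h2]
    have hsplit : (l.drop lo).take (hi - lo) =
        (l.drop lo).take ((lo + hi) / 2 - lo) ++
          ((l.drop ((lo + hi) / 2)).take (hi - (lo + hi) / 2)) := by
      have hd : l.drop ((lo + hi) / 2) = (l.drop lo).drop ((lo + hi) / 2 - lo) := by
        rw [List.drop_drop]; congr 1; omega
      rw [hd, ← List.take_add]
      congr 1; omega
    rw [hsplit, pvS_append, pvM_append]
termination_by hi - lo
decreasing_by all_goals omega

-- A's fold invariant: the running max equals max of mx and cur plus the best prefix ahead.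
theorem pv_invariant (l : List Char) (cur mx : Int) (h : cur ≤ mx) :
    (l.foldl pvStepA (cur, mx)).2 = max mx (cur + pvM l) := by
  induction l generalizing cur mx with
  | nil => simp [pvM]; omega
  | cons c cs ih =>
    have hn := pvM_nonneg cs
    rw [List.foldl_cons]
    by_cases h1 : c = '('
    · subst h1
      have hstep : pvStepA (cur, mx) '(' = (cur + 1, max mx (cur + 1)) := by
        simp [pvStepA, Prod.ext_iff]; omega
      rw [hstep, ih (cur + 1) _ (le_max_right _ _)]
      simp [pvM, pvD]
      omega
    · by_cases h2 : c = ')'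
      · subst h2
        have hstep : pvStepA (cur, mx) ')' = (cur - 1, mx) := by
          simp [pvStepA]
        rw [hstep, ih (cur - 1) mx (by omega)]
        simp [pvM, pvD]
        omega
      · have hstep : pvStepA (cur, mx) c = (cur, mx) := by
          simp [pvStepA, h1, h2]
        rw [hstep, ih cur mx h]
        simp [pvM, pvD, h1, h2]
        omega

-- ===== VERDICT (by name: the statement is the Claim_ definition above) =====
theorem count_max_opened_parentheses_spec : Claim_equal_count_max_opened_parentheses := by
  intro s _
  unfold Spec_count_max_opened_parentheses count_max_opened_parentheses count_max_opened_parentheses_alt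
  rw [pv_invariant s.toList 0 0 le_rfl,
      pvGo_spec s.toList 0 s.toList.length (Nat.zero_le _) le_rfl]
  simp only [List.drop_zero, Nat.sub_zero, List.take_length]
  have := pvM_nonneg s.toList
  omega
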